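-- pv_equiv track=rewrite | github.com/DongCoder7/openclaw-wangcai | skills/portfolio-tracker-pro/scripts/portfolio_pro_v2.py | find_peaks_troughs
-- ===== SOURCE A (Python) =====
-- def find_peaks_troughs(values, window=3):
--     """找到峰值和谷值"""
--     peaks = []
--     troughs = []
--
--     for i in range(window, len(values) - window):
--         if values[i] == max(values[i-window:i+window+1]):
--             peaks.append((i, values[i]))
--         if values[i] == min(values[i-window:i+window+1]):
--             troughs.append((i, values[i]))
--
--     return peaks, troughs
-- ===== SOURCE B (Python) =====
-- def find_peaks_troughs(values, window=3):
--     """Peaks/troughs via a power-of-two sparse table (range max/min), O(n log w)."""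
--     peaks = []
--     troughs = []
--     n = len(values)
--     lo, hi = window, n - window
--     if hi <= lo:
--         return peaks, troughs
--     k = 2 * window + 1
--     # After the loop p is a power of two with p <= k < 2*p,
--     # mx[i] == max(values[i:i+p]) and mn[i] == min(values[i:i+p]).
--     mx = list(values)
--     mn = list(values)
--     p = 1
--     while 2 * p <= k:
--         mx = [mx[i] if mx[i] >= mx[i + p] else mx[i + p] for i in range(len(mx) - p)]
--         mn = [mn[i] if mn[i] <= mn[i + p] else mn[i + p] for i in range(len(mn) - p)]
--         p *= 2
--     off = k - p
--     for i in range(lo, hi):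
--         j = i - window
--         v = values[i]
--         if v == max(mx[j], mx[j + off]):
--             peaks.append((i, v))
--         if v == min(mn[j], mn[j + off]):
--             troughs.append((i, v))
--     return peaks, troughs
-- ===== Notes on version B (the rewrite author's own statement) =====
-- stated objective: alternative
-- what changed: Replaced the per-index rescan of every (2w+1)-wide slice with a power-of-two sparse table (doubling range-max/min arrays), so each window max/min is the combination of two precomputed overlapping blocks.
import Mathlib
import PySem

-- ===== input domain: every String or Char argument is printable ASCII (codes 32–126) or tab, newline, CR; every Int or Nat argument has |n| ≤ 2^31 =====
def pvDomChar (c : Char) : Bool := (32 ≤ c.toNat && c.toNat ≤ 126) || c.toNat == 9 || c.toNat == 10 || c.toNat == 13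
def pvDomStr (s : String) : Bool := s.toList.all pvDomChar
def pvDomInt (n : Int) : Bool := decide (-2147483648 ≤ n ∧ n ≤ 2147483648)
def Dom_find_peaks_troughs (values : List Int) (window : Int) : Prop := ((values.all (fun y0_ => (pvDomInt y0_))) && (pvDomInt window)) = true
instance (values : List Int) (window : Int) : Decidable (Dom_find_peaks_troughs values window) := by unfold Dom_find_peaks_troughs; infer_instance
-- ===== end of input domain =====

-- B replaces A's per-index window rescans by a power-of-two sparse table (range max/min),
-- answering each window query from two precomputed overlapping blocks.

-- ===== PORT A =====
def find_peaks_troughs (values : List Int) (window : Int) : (List (Int × Int)) × (List (Int × Int)) :=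
  (PySem.List.pyRange window ((values.length : Int) - window) 1).foldl
    (fun (acc : List (Int × Int) × List (Int × Int)) i =>
      let v := PySem.List.pyGetD values i 0
      let s := PySem.List.slice values (some (i - window)) (some (i + window + 1))
      let acc1 := if some v = PySem.List.max? s (fun y => y) then (acc.1 ++ [(i, v)], acc.2) else acc
      if some v = PySem.List.min? s (fun y => y) then (acc1.1, acc1.2 ++ [(i, v)]) else acc1)
    ([], [])

-- ===== PORT B =====
-- one level of the sparse table: pairwise combine at distance p (Python's list comprehension)
def pvComb (cmp : Int → Int → Bool) (xs : List Int) (p : Nat) : List Int :=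
  (List.range (xs.length - p)).map
    (fun i => if cmp (xs.getD i 0) (xs.getD (i + p) 0) then xs.getD i 0 else xs.getD (i + p) 0)

-- Python's `while 2*p <= k:` loop, ported with fuel (k iterations always suffice)
def pvBuild (cmp : Int → Int → Bool) (k : Nat) : Nat → List Int → Nat → List Int × Nat
  | 0, xs, p => (xs, p)
  | fuel + 1, xs, p =>
      if 2 * p ≤ k then pvBuild cmp k fuel (pvComb cmp xs p) (2 * p) else (xs, p)

def find_peaks_troughs_alt (values : List Int) (window : Int) : (List (Int × Int)) × (List (Int × Int)) :=
  let n : Int := values.length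
  let lo := window
  let hi := n - window
  if hi ≤ lo then ([], [])
  else
    let k : Nat := (2 * window + 1).toNat
    let mp := pvBuild (fun a b => a ≥ b) k k values 1
    let np := pvBuild (fun a b => a ≤ b) k k values 1
    let mx := mp.1
    let p := mp.2
    let mn := np.1
    let off := k - p
    (PySem.List.pyRange lo hi 1).foldl
      (fun (acc : List (Int × Int) × List (Int × Int)) i =>
        let j := (i - window).toNat
        let v := values.getD i.toNat 0
        let acc1 := if v = max (mx.getD j 0) (mx.getD (j + off) 0) then (acc.1 ++ [(i, v)], acc.2) else acc
        if v = min (mn.getD j 0) (mn.getD (j + off) 0) then (acc1.1, acc1.2 ++ [(i, v)]) else acc1)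
      ([], [])

-- ===== PRECONDITION & SPEC =====
-- Pre_ excludes window < 0, where A always raises (IndexError or ValueError on an empty-slice max).
def Pre_find_peaks_troughs (values : List Int) (window : Int) : Prop := 0 ≤ window
instance (values : List Int) (window : Int) : Decidable (Pre_find_peaks_troughs values window) := by
  unfold Pre_find_peaks_troughs; infer_instance

def pvWitness_find_peaks_troughs : List Int × Int := ([3, 1, 4, 1, 5, 9, 2, 6], 1)

def Spec_find_peaks_troughs (values : List Int) (window : Int) (out : (List (Int × Int)) × (List (Int × Int))) : Prop := out = find_peaks_troughs_alt values window
instance (values : List Int) (window : Int) (out : (List (Int × Int)) × (List (Int × Int))) : Decidable (Spec_find_peaks_troughs values window out) := by unfold Spec_find_peaks_troughs; infer_instance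

-- ===== CLAIM (what is proved, stated in full; the proofs are below) =====
def Claim_equal_find_peaks_troughs : Prop := ∀ (values : List Int) (window : Int), Dom_find_peaks_troughs values window → Pre_find_peaks_troughs values window → Spec_find_peaks_troughs values window (find_peaks_troughs values window)

-- ===== LEMMAS AND PROOFS =====

-- the window values[i:i+p] and Python's max()/min() of a nonempty list
def pvWin (values : List Int) (i p : Nat) : List Int := (values.drop i).take p

def pvRmax : List Int → Int
  | [] => 0
  | x :: t => t.foldl max x

def pvRmin : List Int → Int
  | [] => 0
  | x :: t => t.foldl min x

lemma pvRmax_mem {l : List Int} (h : l ≠ []) : pvRmax l ∈ l := by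
  cases l with
  | nil => exact absurd rfl h
  | cons x t =>
      rcases PySem.List.foldl_max_mem t x with h1 | h1
      · simp [pvRmax, h1]
      · simp [pvRmax, h1]

lemma pvRmin_mem {l : List Int} (h : l ≠ []) : pvRmin l ∈ l := by
  cases l with
  | nil => exact absurd rfl h
  | cons x t =>
      rcases PySem.List.foldl_min_mem t x with h1 | h1
      · simp [pvRmin, h1]
      · simp [pvRmin, h1]

lemma pvRmax_ub {l : List Int} {y : Int} (hy : y ∈ l) : y ≤ pvRmax l := by
  cases l with
  | nil => simp at hy
  | cons x t =>
      rcases List.mem_cons.mp hy with rfl | hy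
      · exact (PySem.List.le_foldl_max t y).1
      · exact (PySem.List.le_foldl_max t x).2 y hy

lemma pvRmin_lb {l : List Int} {y : Int} (hy : y ∈ l) : pvRmin l ≤ y := by
  cases l with
  | nil => simp at hy
  | cons x t =>
      rcases List.mem_cons.mp hy with rfl | hy
      · exact (PySem.List.foldl_min_le t y).1
      · exact (PySem.List.foldl_min_le t x).2 y hy

lemma pvRmax_eq {l : List Int} {m : Int} (hm : m ∈ l) (hub : ∀ y ∈ l, y ≤ m) : pvRmax l = m := by
  have h1 : l ≠ [] := by intro h; subst h; simp at hm
  exact le_antisymm (hub _ (pvRmax_mem h1)) (pvRmax_ub hm)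

lemma pvRmin_eq {l : List Int} {m : Int} (hm : m ∈ l) (hlb : ∀ y ∈ l, m ≤ y) : pvRmin l = m := by
  have h1 : l ≠ [] := by intro h; subst h; simp at hm
  exact le_antisymm (pvRmin_lb hm) (hlb _ (pvRmin_mem h1))

lemma max?_eq_pvRmax {l : List Int} (h : l ≠ []) :
    PySem.List.max? l (fun y => y) = some (pvRmax l) := by
  cases l with
  | nil => exact absurd rfl h
  | cons x t => simpa [pvRmax] using PySem.List.max?_id_cons x t

lemma min?_eq_pvRmin {l : List Int} (h : l ≠ []) :
    PySem.List.min? l (fun y => y) = some (pvRmin l) := by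
  cases l with
  | nil => exact absurd rfl h
  | cons x t => simpa [pvRmin] using PySem.List.min?_id_cons x t

lemma length_pvWin (values : List Int) (i p : Nat) (h : i + p ≤ values.length) :
    (pvWin values i p).length = p := by
  simp [pvWin]; omega

lemma pvWin_ne_nil (values : List Int) {i p : Nat} (hp : 1 ≤ p) (h : i + p ≤ values.length) :
    pvWin values i p ≠ [] := by
  intro hnil
  have := length_pvWin values i p h
  rw [hnil] at this
  simp at this
  omega

lemma pvWin_append (values : List Int) (i p q : Nat) :
    pvWin values i (p + q) = pvWin values i p ++ pvWin values (i + p) q := by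
  unfold pvWin
  rw [List.take_add, List.drop_drop]

lemma mem_take_mono {l : List Int} {p q : Nat} (hpq : p ≤ q) {x : Int}
    (hx : x ∈ l.take p) : x ∈ l.take q := by
  have h1 : l.take p = (l.take q).take p := by
    rw [List.take_take]; congr 1; omega
  rw [h1] at hx
  exact List.mem_of_mem_take hx

lemma pvRmax_win_overlap (values : List Int) {j p k : Nat} (hp : 1 ≤ p) (hpk : p ≤ k)
    (hk2 : k ≤ 2 * p) (h : j + k ≤ values.length) :
    pvRmax (pvWin values j k) =
      max (pvRmax (pvWin values j p)) (pvRmax (pvWin values (j + (k - p)) p)) := by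
  set off := k - p with hoff
  have hcov : pvWin values j k = pvWin values j off ++ pvWin values (j + off) p := by
    have : k = off + p := by omega
    rw [this, pvWin_append]
  have hr1 : pvRmax (pvWin values j p) ∈ pvWin values j p :=
    pvRmax_mem (pvWin_ne_nil values hp (by omega))
  have hr2 : pvRmax (pvWin values (j + off) p) ∈ pvWin values (j + off) p :=
    pvRmax_mem (pvWin_ne_nil values hp (by omega))
  apply pvRmax_eq
  · rcases max_choice (pvRmax (pvWin values j p)) (pvRmax (pvWin values (j + off) p)) with he | he <;> rw [he]
    · exact mem_take_mono hpk hr1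
    · rw [hcov]; exact List.mem_append_right _ hr2
  · intro y hy
    rw [hcov] at hy
    rcases List.mem_append.mp hy with hy | hy
    · exact le_trans (pvRmax_ub (mem_take_mono (show off ≤ p by omega) hy)) (le_max_left _ _)
    · exact le_trans (pvRmax_ub hy) (le_max_right _ _)

lemma pvRmin_win_overlap (values : List Int) {j p k : Nat} (hp : 1 ≤ p) (hpk : p ≤ k)
    (hk2 : k ≤ 2 * p) (h : j + k ≤ values.length) :
    pvRmin (pvWin values j k) =
      min (pvRmin (pvWin values j p)) (pvRmin (pvWin values (j + (k - p)) p)) := by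
  set off := k - p with hoff
  have hcov : pvWin values j k = pvWin values j off ++ pvWin values (j + off) p := by
    have : k = off + p := by omega
    rw [this, pvWin_append]
  have hr1 : pvRmin (pvWin values j p) ∈ pvWin values j p :=
    pvRmin_mem (pvWin_ne_nil values hp (by omega))
  have hr2 : pvRmin (pvWin values (j + off) p) ∈ pvWin values (j + off) p :=
    pvRmin_mem (pvWin_ne_nil values hp (by omega))
  apply pvRmin_eq
  · rcases min_choice (pvRmin (pvWin values j p)) (pvRmin (pvWin values (j + off) p)) with he | he <;> rw [he]
    · exact mem_take_mono hpk hr1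
    · rw [hcov]; exact List.mem_append_right _ hr2
  · intro y hy
    rw [hcov] at hy
    rcases List.mem_append.mp hy with hy | hy
    · exact le_trans (min_le_left _ _) (pvRmin_lb (mem_take_mono (show off ≤ p by omega) hy))
    · exact le_trans (min_le_right _ _) (pvRmin_lb hy)

lemma length_pvComb (cmp : Int → Int → Bool) (xs : List Int) (p : Nat) :
    (pvComb cmp xs p).length = xs.length - p := by
  simp [pvComb]

lemma pvComb_getD (cmp : Int → Int → Bool) (xs : List Int) (p i : Nat)
    (h : i < xs.length - p) :
    (pvComb cmp xs p).getD i 0 =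
      if cmp (xs.getD i 0) (xs.getD (i + p) 0) then xs.getD i 0 else xs.getD (i + p) 0 := by
  unfold pvComb
  rw [List.getD_eq_getElem _ _ (by simpa using h)]
  simp

-- the sparse-table invariant, max side
lemma pvBuild_inv_max (values : List Int) (k : Nat) (hkn : k ≤ values.length) :
    ∀ (fuel p : Nat) (xs : List Int), 1 ≤ p → p ≤ k → k ≤ fuel + p →
      xs.length + p = values.length + 1 →
      (∀ i : Nat, i + p ≤ values.length → xs.getD i 0 = pvRmax (pvWin values i p)) →
      1 ≤ (pvBuild (fun a b => a ≥ b) k fuel xs p).2 ∧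
      (pvBuild (fun a b => a ≥ b) k fuel xs p).2 ≤ k ∧
      k < 2 * (pvBuild (fun a b => a ≥ b) k fuel xs p).2 ∧
      (∀ i : Nat, i + (pvBuild (fun a b => a ≥ b) k fuel xs p).2 ≤ values.length →
        (pvBuild (fun a b => a ≥ b) k fuel xs p).1.getD i 0 =
          pvRmax (pvWin values i (pvBuild (fun a b => a ≥ b) k fuel xs p).2)) := by
  intro fuel
  induction fuel with
  | zero =>
      intro p xs hp hpk hfuel hlen hpt
      simp only [pvBuild]
      exact ⟨hp, hpk, by omega, hpt⟩
  | succ m ih =>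
      intro p xs hp hpk hfuel hlen hpt
      simp only [pvBuild]
      by_cases hc : 2 * p ≤ k
      · rw [if_pos hc]
        apply ih (2 * p) (pvComb (fun a b => a ≥ b) xs p) (by omega) hc (by omega)
        · rw [length_pvComb]; omega
        · intro i hi
          rw [pvComb_getD _ _ _ _ (by omega)]
          rw [hpt i (by omega), hpt (i + p) (by omega)]
          have hsplit := pvRmax_win_overlap values (j := i) (p := p) (k := 2 * p)
            hp (by omega) (by omega) (by omega)
          have hoff : 2 * p - p = p := by omega
          rw [hoff] at hsplit
          rw [show (2 : Nat) * p = p + p by omega] at hsplit ⊢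
          rw [hsplit]
          rcases le_total (pvRmax (pvWin values i p)) (pvRmax (pvWin values (i + p) p)) with hle | hle
          · rcases eq_or_lt_of_le hle with he | hlt
            · simp [he]
            · rw [if_neg (by simpa using not_le.mpr hlt), max_eq_right hle]
          · rw [if_pos (by simpa using hle), max_eq_left hle]
      · rw [if_neg hc]
        exact ⟨hp, hpk, by omega, hpt⟩

-- the sparse-table invariant, min side
lemma pvBuild_inv_min (values : List Int) (k : Nat) (hkn : k ≤ values.length) :
    ∀ (fuel p : Nat) (xs : List Int), 1 ≤ p → p ≤ k → k ≤ fuel + p →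
      xs.length + p = values.length + 1 →
      (∀ i : Nat, i + p ≤ values.length → xs.getD i 0 = pvRmin (pvWin values i p)) →
      1 ≤ (pvBuild (fun a b => a ≤ b) k fuel xs p).2 ∧
      (pvBuild (fun a b => a ≤ b) k fuel xs p).2 ≤ k ∧
      k < 2 * (pvBuild (fun a b => a ≤ b) k fuel xs p).2 ∧
      (∀ i : Nat, i + (pvBuild (fun a b => a ≤ b) k fuel xs p).2 ≤ values.length →
        (pvBuild (fun a b => a ≤ b) k fuel xs p).1.getD i 0 =
          pvRmin (pvWin values i (pvBuild (fun a b => a ≤ b) k fuel xs p).2)) := by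
  intro fuel
  induction fuel with
  | zero =>
      intro p xs hp hpk hfuel hlen hpt
      simp only [pvBuild]
      exact ⟨hp, hpk, by omega, hpt⟩
  | succ m ih =>
      intro p xs hp hpk hfuel hlen hpt
      simp only [pvBuild]
      by_cases hc : 2 * p ≤ k
      · rw [if_pos hc]
        apply ih (2 * p) (pvComb (fun a b => a ≤ b) xs p) (by omega) hc (by omega)
        · rw [length_pvComb]; omega
        · intro i hi
          rw [pvComb_getD _ _ _ _ (by omega)]
          rw [hpt i (by omega), hpt (i + p) (by omega)]
          have hsplit := pvRmin_win_overlap values (j := i) (p := p) (k := 2 * p)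
            hp (by omega) (by omega) (by omega)
          have hoff : 2 * p - p = p := by omega
          rw [hoff] at hsplit
          rw [show (2 : Nat) * p = p + p by omega] at hsplit ⊢
          rw [hsplit]
          rcases le_total (pvRmin (pvWin values i p)) (pvRmin (pvWin values (i + p) p)) with hle | hle
          · rw [if_pos (by simpa using hle), min_eq_left hle]
          · rcases eq_or_lt_of_le hle with he | hlt
            · simp [he]
            · rw [if_neg (by simpa using not_le.mpr hlt), min_eq_right hle]
      · rw [if_neg hc]
        exact ⟨hp, hpk, by omega, hpt⟩

lemma pvBuild_snd (cmp cmp' : Int → Int → Bool) (k : Nat) :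
    ∀ (fuel p : Nat) (xs ys : List Int),
      (pvBuild cmp k fuel xs p).2 = (pvBuild cmp' k fuel ys p).2 := by
  intro fuel
  induction fuel with
  | zero => intro p xs ys; simp [pvBuild]
  | succ m ih =>
      intro p xs ys
      simp only [pvBuild]
      by_cases hc : 2 * p ≤ k
      · rw [if_pos hc, if_pos hc]; exact ih _ _ _
      · rw [if_neg hc, if_neg hc]

-- level-0 seed of the invariant: values itself is the table of width-1 windows
lemma pvSeed_max (values : List Int) :
    ∀ i : Nat, i + 1 ≤ values.length → values.getD i 0 = pvRmax (pvWin values i 1) := by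
  intro i hi
  have h1 : values.drop i = values[i] :: values.drop (i + 1) :=
    List.drop_eq_getElem_cons (by omega)
  rw [List.getD_eq_getElem _ _ (show i < values.length by omega)]
  unfold pvWin
  rw [h1]
  rfl

lemma pvSeed_min (values : List Int) :
    ∀ i : Nat, i + 1 ≤ values.length → values.getD i 0 = pvRmin (pvWin values i 1) := by
  intro i hi
  have h1 : values.drop i = values[i] :: values.drop (i + 1) :=
    List.drop_eq_getElem_cons (by omega)
  rw [List.getD_eq_getElem _ _ (show i < values.length by omega)]
  unfold pvWin
  rw [h1]
  rfl

-- ===== VERDICT (by name: the statement is the Claim_ definition above) =====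
theorem find_peaks_troughs_spec : Claim_equal_find_peaks_troughs := by
  intro values window _hDom hPre
  have hw : (0 : Int) ≤ window := hPre
  unfold Spec_find_peaks_troughs find_peaks_troughs find_peaks_troughs_alt
  by_cases hrange : (values.length : Int) - window ≤ window
  · rw [if_pos hrange, PySem.List.pyRange_one_eq_nil hrange]
    simp
  · rw [if_neg hrange]
    rw [not_le] at hrange
    set n : Nat := values.length with hn
    set k : Nat := (2 * window + 1).toNat with hk
    have hkn : k ≤ n := by omega
    have hinvM := pvBuild_inv_max values k hkn k 1 values (by omega) (by omega) (by omega)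
      (by omega) (pvSeed_max values)
    have hinvN := pvBuild_inv_min values k hkn k 1 values (by omega) (by omega) (by omega)
      (by omega) (pvSeed_min values)
    set mp := pvBuild (fun a b => a ≥ b) k k values 1 with hmp
    set np := pvBuild (fun a b => a ≤ b) k k values 1 with hnp
    obtain ⟨hp1, hpk, hk2p, hptM⟩ := hinvM
    obtain ⟨hq1, hqk, hk2q, hptN⟩ := hinvN
    apply PySem.List.foldl_congr_mem
    intro acc i hi
    rw [PySem.List.mem_pyRange_one] at hi
    obtain ⟨hi1, hi2⟩ := hi
    set j : Nat := (i - window).toNat with hj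
    have hjk : j + k ≤ n := by omega
    -- values[i] on both sides
    have hv : PySem.List.pyGetD values i 0 = values.getD i.toNat 0 := by
      rw [PySem.List.pyGetD_eq_getElem values 0 (by omega) (by omega),
        List.getD_eq_getElem _ _ (by omega)]
    -- A's slice is the window of width k starting at j
    have hs : PySem.List.slice values (some (i - window)) (some (i + window + 1)) =
        pvWin values j k := by
      rw [PySem.List.slice_toNat values (by omega) (by omega)]
      unfold pvWin
      congr 1
      omega
    have hwin_ne : pvWin values j k ≠ [] := pvWin_ne_nil values (by omega) hjk
    -- A's max()/min() against B's two-block answers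
    have hmaxA : PySem.List.max? (pvWin values j k) (fun y => y) = some (pvRmax (pvWin values j k)) :=
      max?_eq_pvRmax hwin_ne
    have hminA : PySem.List.min? (pvWin values j k) (fun y => y) = some (pvRmin (pvWin values j k)) :=
      min?_eq_pvRmin hwin_ne
    have hmaxB : max (mp.1.getD j 0) (mp.1.getD (j + (k - mp.2)) 0) = pvRmax (pvWin values j k) := by
      rw [hptM j (by omega), hptM (j + (k - mp.2)) (by omega)]
      exact (pvRmax_win_overlap values hp1 hpk (by omega) hjk).symm
    have hminB : min (np.1.getD j 0) (np.1.getD (j + (k - mp.2)) 0) = pvRmin (pvWin values j k) := by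
      have hpq : mp.2 = np.2 := by
        rw [hmp, hnp]; exact pvBuild_snd _ _ k k 1 values values
      rw [hpq, hptN j (by omega), hptN (j + (k - np.2)) (by omega)]
      exact (pvRmin_win_overlap values hq1 hqk (by omega) (by omega)).symm
    simp only [hv, hs, hmaxA, hminA, Option.some.injEq]
    rw [← hmp, ← hnp, hmaxB, hminB]
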